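-- pv_equiv track=rewrite | github.com/Impavidity/skr-toolkits | skr2/structure/table.py | normalize_cell_value
-- ===== SOURCE A (Python) =====
-- def normalize_cell_value(text):
--   for month in [("Jan ", "January "),
--                 ("Feb ", "February "),
--                 ("Mar ", "March "),
--                 ("Apr ", "April "),
--                 ("May ", "May "),
--                 ("Jun ", "June "),
--                 ("Jul ", "July "),
--                 ("Aug ", "August "),
--                 ("Sep ", "September "),
--                 ("Oct ", "October "),
--                 ("Nov ", "November "),
--                 ("Dec ", "December ")]:
--     if month[0] in text:
--       text = text.replace(month[0], month[1])
--   return text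
-- ===== SOURCE B (Python) =====
-- MONTHS = {"Jan ": "January ", "Feb ": "February ", "Mar ": "March ",
--           "Apr ": "April ", "May ": "May ", "Jun ": "June ",
--           "Jul ": "July ", "Aug ": "August ", "Sep ": "September ",
--           "Oct ": "October ", "Nov ": "November ", "Dec ": "December "}
--
--
-- def normalize_cell_value(text):
--     out = []
--     i = 0
--     n = len(text)
--     while i < n:
--         full = MONTHS.get(text[i:i + 4])
--         if full is not None:
--             out.append(full)
--             i += 4
--         else:
--             out.append(text[i])
--             i += 1
--     return "".join(out)
-- ===== Notes on version B (the rewrite author's own statement) =====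
-- stated objective: alternative
-- what changed: Replaces A's 12 sequential whole-string replace passes by a single left-to-right scan that looks up the 4-character window at each position in a month dictionary and either emits the expansion (skipping 4 chars) or copies one character.
import Mathlib
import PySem

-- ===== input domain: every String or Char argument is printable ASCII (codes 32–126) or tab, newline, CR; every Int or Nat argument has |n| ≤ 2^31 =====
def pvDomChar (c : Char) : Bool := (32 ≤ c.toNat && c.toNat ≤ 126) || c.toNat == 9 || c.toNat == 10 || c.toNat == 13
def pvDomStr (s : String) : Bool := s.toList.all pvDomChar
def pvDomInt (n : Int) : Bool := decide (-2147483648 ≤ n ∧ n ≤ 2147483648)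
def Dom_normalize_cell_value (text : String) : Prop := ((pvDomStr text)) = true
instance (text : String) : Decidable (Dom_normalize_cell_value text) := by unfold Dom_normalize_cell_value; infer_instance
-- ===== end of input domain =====

-- B replaces A's 12 sequential replace passes by one left-to-right scan with a
-- dictionary lookup on the 4-character window (objective: alternative algorithm).

-- ===== PORT A =====
-- the literal list of (abbreviation, full name) pairs A iterates over
def pvMonths : List (String × String) :=
  [("Jan ", "January "), ("Feb ", "February "), ("Mar ", "March "),
   ("Apr ", "April "), ("May ", "May "), ("Jun ", "June "),
   ("Jul ", "July "), ("Aug ", "August "), ("Sep ", "September "),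
   ("Oct ", "October "), ("Nov ", "November "), ("Dec ", "December ")]

def normalize_cell_value (text : String) : String :=
  pvMonths.foldl
    (fun t m => if PySem.Str.isIn m.1 t then PySem.Str.replace t m.1 m.2 else t)
    text

-- ===== PORT B =====
-- Source B's MONTHS dict, keys/values as char lists (the scan works on code points)
def pvTable : List (List Char × List Char) :=
  [("Jan ".toList, "January ".toList), ("Feb ".toList, "February ".toList),
   ("Mar ".toList, "March ".toList), ("Apr ".toList, "April ".toList),
   ("May ".toList, "May ".toList), ("Jun ".toList, "June ".toList),
   ("Jul ".toList, "July ".toList), ("Aug ".toList, "August ".toList),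
   ("Sep ".toList, "September ".toList), ("Oct ".toList, "October ".toList),
   ("Nov ".toList, "November ".toList), ("Dec ".toList, "December ".toList)]

-- Source B's while-loop (hand-ported, exact): at each position look the 4-char
-- window up in the dict; on a hit emit the full name and skip 4 characters,
-- otherwise copy one character.
def pvScan : List Char → List Char
  | [] => []
  | c :: cs =>
    match PySem.Dict.get? (⟨pvTable⟩ : PySem.Dict (List Char) (List Char)) ((c :: cs).take 4) with
    | some full => full ++ pvScan ((c :: cs).drop 4)
    | none => c :: pvScan cs
termination_by l => l.length
decreasing_by
  all_goals simp
  all_goals omega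

def normalize_cell_value_alt (text : String) : String :=
  String.ofList (pvScan text.toList)

-- ===== PRECONDITION & SPEC =====
def Spec_normalize_cell_value (text : String) (out : String) : Prop := out = normalize_cell_value_alt text
instance (text : String) (out : String) : Decidable (Spec_normalize_cell_value text out) := by unfold Spec_normalize_cell_value; infer_instance

-- ===== CLAIM (what is proved, stated in full; the proofs are below) =====
def Claim_equal_normalize_cell_value : Prop := ∀ (text : String), Dom_normalize_cell_value text → Spec_normalize_cell_value text (normalize_cell_value text)

-- ===== LEMMAS AND PROOFS =====

-- A's per-pattern step and whole chain of replaces, on the char-list side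
def pvRep (t : List Char) (m : List Char × List Char) : List Char :=
  PySem.Chars.replace t m.1 m.2

def pvChain (l : List Char) : List Char := pvTable.foldl pvRep l

-- concrete facts about the table, all checked by the kernel
lemma pv_key_len : ∀ pr ∈ pvTable, pr.1.length = 4 := by decide
lemma pv_full_len : ∀ pr ∈ pvTable, 4 ≤ pr.2.length := by decide
lemma pv_keys_nodup : (pvTable.map Prod.fst).Nodup := by decide
lemma pv_mid_key : ∀ pr ∈ pvTable, ∀ q ∈ pvTable, ∀ m, 1 ≤ m → m < 4 →
    ¬ q.1.drop m <+: pr.1 := by decide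
lemma pv_mid_full : ∀ pr ∈ pvTable, ∀ q ∈ pvTable, ∀ m, 1 ≤ m → m < 4 →
    ¬ q.1.drop m <+: pr.2 := by decide
lemma pv_key_tail : ∀ pr ∈ pvTable, ∀ q ∈ pvTable, q.1 ≠ pr.1 → ∀ d, d < 4 →
    ¬ q.1 <+: pr.1.drop d ∧ ¬ pr.1.drop d <+: q.1 := by decide
lemma pv_full_tail : ∀ pr ∈ pvTable, ∀ q ∈ pvTable, q.1 ≠ pr.1 → ∀ d, d < pr.2.length →
    ¬ q.1 <+: pr.2.drop d ∧ ¬ pr.2.drop d <+: q.1 := by decide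

lemma pv_key_ne_nil (pr : List Char × List Char) (hpr : pr ∈ pvTable) : pr.1 ≠ [] := by
  intro hnil
  have := pv_key_len pr hpr
  rw [hnil] at this
  simp at this

-- ---- facts about PySem.Chars.replace ----

lemma pv_go_acc (old new : List Char) :
    ∀ (fuel : Nat) (l acc : List Char),
      PySem.Chars.replace.go old new fuel l acc =
        acc.reverse ++ PySem.Chars.replace.go old new fuel l [] := by
  intro fuel
  induction fuel with
  | zero => intro l acc; simp [PySem.Chars.replace.go]
  | succ n ih =>
    intro l acc
    cases l with
    | nil => simp [PySem.Chars.replace.go]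
    | cons c t =>
      rw [PySem.Chars.replace.go, PySem.Chars.replace.go]
      split_ifs with h
      · rw [ih (List.drop old.length (c :: t)) (new.reverse ++ acc),
            ih (List.drop old.length (c :: t)) (new.reverse ++ [])]
        simp
      · rw [ih t (c :: acc), ih t (c :: [])]
        simp

lemma pv_go_fuel (old new : List Char) (hne : old ≠ []) :
    ∀ (fuel : Nat) (l : List Char), l.length ≤ fuel →
      PySem.Chars.replace.go old new fuel l [] =
        PySem.Chars.replace.go old new l.length l [] := by
  intro fuel
  induction fuel using Nat.strong_induction_on with
  | _ fuel ih =>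
    intro l hl
    cases fuel with
    | zero =>
      interval_cases hll : l.length
      · cases l with
        | nil => rfl
        | cons c t => simp at hll
    | succ n =>
      cases l with
      | nil => simp [PySem.Chars.replace.go]
      | cons c t =>
        simp only [List.length_cons]
        rw [PySem.Chars.replace.go, PySem.Chars.replace.go]
        split_ifs with h
        · rw [pv_go_acc, pv_go_acc old new (t.length)]
          have hlen : (List.drop old.length (c :: t)).length ≤ n := by
            simp only [List.length_drop]
            have : 1 ≤ old.length := by
              cases old with
              | nil => exact absurd rfl hne
              | cons _ _ => simp
            simp at hl ⊢
            omega
          have hlen2 : (List.drop old.length (c :: t)).length ≤ t.length := by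
            simp only [List.length_drop]
            have : 1 ≤ old.length := by
              cases old with
              | nil => exact absurd rfl hne
              | cons _ _ => simp
            simp
            omega
          rw [ih n (by omega) _ hlen, ih t.length (by simp at hl; omega) _ hlen2]
        · rw [pv_go_acc, pv_go_acc old new t.length]
          rw [ih n (by omega) t (by simp at hl; omega), ih t.length (by simp at hl; omega) t (le_refl _)]

lemma pv_rep_nil (old new : List Char) (hne : old ≠ []) :
    PySem.Chars.replace [] old new = [] := by
  simp [PySem.Chars.replace, hne, PySem.Chars.replace.go]

lemma pv_rep_skip (old new : List Char) (hne : old ≠ []) (c : Char) (l : List Char)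
    (h : ¬ old <+: c :: l) :
    PySem.Chars.replace (c :: l) old new = c :: PySem.Chars.replace l old new := by
  have hb : old.isPrefixOf (c :: l) = false := by
    rw [Bool.eq_false_iff]
    intro hh
    exact h (List.isPrefixOf_iff_prefix.mp hh)
  simp only [PySem.Chars.replace, List.isEmpty_eq_false_iff.mpr hne]
  simp only [List.length_cons]
  rw [PySem.Chars.replace.go, hb]
  simp only [Bool.false_eq_true, if_false]
  rw [pv_go_acc old new l.length l (c :: [])]
  simp

lemma pv_rep_head (old new t : List Char) (hne : old ≠ []) :
    PySem.Chars.replace (old ++ t) old new = new ++ PySem.Chars.replace t old new := by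
  cases old with
  | nil => exact absurd rfl hne
  | cons o os =>
    have hb : (o :: os).isPrefixOf ((o :: os) ++ t) = true :=
      List.isPrefixOf_iff_prefix.mpr (List.prefix_append _ _)
    simp only [PySem.Chars.replace, List.isEmpty_eq_false_iff.mpr hne]
    have hlen : ((o :: os) ++ t).length = (os ++ t).length + 1 := by simp
    rw [show (o :: os) ++ t = o :: (os ++ t) from rfl]
    simp only [List.length_cons]
    rw [PySem.Chars.replace.go]
    rw [show o :: (os ++ t) = (o :: os) ++ t from rfl, hb]
    simp only [if_true]
    rw [show ((o :: os) : List Char).length = os.length + 1 from rfl]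
    rw [List.drop_append_of_le_length (by simp)]
    simp only [List.drop_succ_cons]
    rw [List.drop_of_length_le (le_refl _)]
    simp only [List.nil_append]
    rw [pv_go_acc]
    rw [pv_go_fuel _ _ (by simp) _ _ (by simp)]
    simp

lemma pv_rep_skip_all (old new : List Char) (hne : old ≠ []) :
    ∀ (X u : List Char),
    (∀ j < X.length, ¬ old <+: (X ++ u).drop j) →
    PySem.Chars.replace (X ++ u) old new = X ++ PySem.Chars.replace u old new := by
  intro X
  induction X with
  | nil => intro u _; simp
  | cons x X' ihX =>
    intro u h
    have h0 := h 0 (by simp)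
    simp only [List.drop_zero] at h0
    rw [show (x :: X') ++ u = x :: (X' ++ u) from rfl] at h0 ⊢
    rw [pv_rep_skip old new hne x (X' ++ u) h0]
    rw [ihX u (fun j hj => by
      have := h (j + 1) (by simp; omega)
      simpa using this)]
    rfl

lemma pv_rep_no_infix (old new : List Char) (hne : old ≠ []) :
    ∀ l : List Char, ¬ old <:+: l →
    PySem.Chars.replace l old new = l := by
  intro l
  induction l with
  | nil => intro _; exact pv_rep_nil old new hne
  | cons c cs ih =>
    intro h
    rw [pv_rep_skip old new hne c cs (fun hp => h hp.isInfix)]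
    rw [ih (fun hi => h (hi.trans (List.suffix_cons c cs).isInfix))]

lemma pv_straddle (q X u : List Char) (h : q <+: X ++ u) : q <+: X ∨ X <+: q := by
  by_cases hle : q.length ≤ X.length
  · left
    rw [List.prefix_iff_eq_take] at h
    exact List.prefix_iff_eq_take.mpr (h.trans (List.take_append_of_le_length hle))
  · right
    obtain ⟨w, hw⟩ := h
    have hX : X = (q ++ w).take X.length := by
      rw [hw, List.take_append_of_le_length (le_refl _), List.take_length]
    exact List.prefix_iff_eq_take.mpr
      (hX.trans (List.take_append_of_le_length (by omega)))

-- ---- prefix geometry and fold lemmas ----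

lemma pv_front (a r v q : List Char) (hq4 : q.length = 4)
    (h4 : 4 ≤ v.length)
    (hmin : ∀ j < a.length, ¬ q <+: (a ++ r).drop j)
    (hmid : ∀ m, 1 ≤ m → m < 4 → ¬ q.drop m <+: v) :
    ∀ u j, j < a.length → ¬ q <+: (a ++ (v ++ u)).drop j := by
  intro u j hj hq
  rw [List.drop_append_of_le_length (le_of_lt hj)] at hq
  rcases pv_straddle q (a.drop j) (v ++ u) hq with h1 | h2
  · exact hmin j hj (by
      rw [List.drop_append_of_le_length (le_of_lt hj)]
      exact h1.trans (List.prefix_append _ _))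
  · have hm1 : 1 ≤ (a.drop j).length := by simp; omega
    have hmle : (a.drop j).length ≤ 4 := hq4 ▸ h2.length_le
    by_cases hm4 : (a.drop j).length = 4
    · have heq : a.drop j = q := h2.eq_of_length (by omega)
      exact hmin j hj (by
        rw [List.drop_append_of_le_length (le_of_lt hj), ← heq]
        exact List.prefix_append _ _)
    · have hmlt : (a.drop j).length < 4 := lt_of_le_of_ne hmle hm4
      obtain ⟨s, hs⟩ := h2
      obtain ⟨w', hw'⟩ := hq
      rw [← hs] at hw'
      have hsw : s ++ w' = v ++ u := by
        rwa [List.append_assoc, List.append_cancel_left_eq] at hw'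
      rcases pv_straddle s v u ⟨w', hsw⟩ with hsv1 | hsv2
      · have hs' : s = q.drop (a.drop j).length := by
          rw [← hs]; simp
        exact hmid _ hm1 hmlt (hs' ▸ hsv1)
      · have h1 := hsv2.length_le
        have h2 : s.length = 4 - (a.drop j).length := by
          have := congrArg List.length hs
          simp at this
          omega
        omega

lemma pv_side (v q : List Char)
    (hvq : ∀ d < v.length, ¬ q <+: v.drop d ∧ ¬ v.drop d <+: q) :
    ∀ u d, d < v.length → ¬ q <+: (v ++ u).drop d := by
  intro u d hd hq
  rw [List.drop_append_of_le_length (le_of_lt hd)] at hq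
  rcases pv_straddle q (v.drop d) u hq with h1 | h2
  · exact (hvq d hd).1 h1
  · exact (hvq d hd).2 h2

lemma pv_front_all (a r v q : List Char) (hq4 : q.length = 4) (h4 : 4 ≤ v.length)
    (hmin : ∀ j < a.length, ¬ q <+: (a ++ r).drop j)
    (hmid : ∀ m, 1 ≤ m → m < 4 → ¬ q.drop m <+: v)
    (hside : ∀ d < v.length, ¬ q <+: v.drop d ∧ ¬ v.drop d <+: q) :
    ∀ u j, j < a.length + v.length → ¬ q <+: ((a ++ v) ++ u).drop j := by
  intro u j hj
  rw [List.append_assoc]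
  by_cases hja : j < a.length
  · exact pv_front a r v q hq4 h4 hmin hmid u j hja
  · intro hq
    have hd : j - a.length < v.length := by omega
    have : (a ++ (v ++ u)).drop j = (v ++ u).drop (j - a.length) := by
      rw [List.drop_append]
      rw [List.drop_of_length_le (by omega)]
      simp
    rw [this] at hq
    exact pv_side v q hside u (j - a.length) hd hq

lemma pv_foldl_front (Q : List (List Char × List Char)) (X : List Char)
    (h : ∀ pr ∈ Q, pr.1 ≠ [] ∧ ∀ u j, j < X.length → ¬ pr.1 <+: (X ++ u).drop j) :
    ∀ u, Q.foldl pvRep (X ++ u) = X ++ Q.foldl pvRep u := by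
  induction Q with
  | nil => intro u; simp
  | cons pr Q' ih =>
    intro u
    obtain ⟨hne, hcond⟩ := h pr (List.mem_cons_self)
    have hstep : pvRep (X ++ u) pr = X ++ pvRep u pr :=
      pv_rep_skip_all pr.1 pr.2 hne X u (fun j hj => hcond u j hj)
    simp only [List.foldl_cons, hstep]
    exact ih (fun p hp => h p (List.mem_cons_of_mem _ hp)) (pvRep u pr)

lemma pv_foldl_id (Q : List (List Char × List Char)) (l : List Char)
    (h : ∀ pr ∈ Q, pr.1 ≠ [] ∧ ¬ pr.1 <:+: l) :
    Q.foldl pvRep l = l := by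
  induction Q with
  | nil => simp
  | cons pr Q' ih =>
    obtain ⟨hne, hinf⟩ := h pr (List.mem_cons_self)
    simp only [List.foldl_cons]
    rw [show pvRep l pr = l from pv_rep_no_infix pr.1 pr.2 hne l hinf]
    exact ih (fun p hp => h p (List.mem_cons_of_mem _ hp))

-- ---- scan characterisation ----

lemma pv_find_of_mem {α : Type} [BEq α] [LawfulBEq α] (pk : α) (rk : α)
    (L : List (α × α)) (hnd : (L.map Prod.fst).Nodup) (hmem : (pk, rk) ∈ L) :
    L.find? (fun p => p.1 == pk) = some (pk, rk) := by
  induction L with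
  | nil => simp at hmem
  | cons p L' ih =>
    rcases List.mem_cons.mp hmem with heq | htail
    · subst heq; simp [List.find?]
    · rw [List.map_cons, List.nodup_cons] at hnd
      obtain ⟨hnotin, hnd'⟩ := hnd
      have hne : p.1 ≠ pk := by
        intro hpk
        exact hnotin (hpk ▸ List.mem_map_of_mem htail)
      rw [List.find?_cons_of_neg (by simpa using hne)]
      exact ih hnd' htail

lemma pv_get?_of_mem (pk rk : List Char) (hmem : (pk, rk) ∈ pvTable) :
    PySem.Dict.get? (⟨pvTable⟩ : PySem.Dict (List Char) (List Char)) pk = some rk := by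
  unfold PySem.Dict.get?
  rw [show (⟨pvTable⟩ : PySem.Dict (List Char) (List Char)).items = pvTable from rfl]
  rw [pv_find_of_mem pk rk pvTable pv_keys_nodup hmem]
  rfl

lemma pv_scan_match (pk rk l : List Char) (hmem : (pk, rk) ∈ pvTable) (hp : pk <+: l) :
    pvScan l = rk ++ pvScan (l.drop 4) := by
  have hlen : pk.length = 4 := pv_key_len _ hmem
  cases l with
  | nil =>
    have := hp.length_le; simp [hlen] at this
  | cons c cs =>
    have htake : (c :: cs).take 4 = pk := by
      rw [List.prefix_iff_eq_take] at hp
      rw [← hlen, ← hp]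
    rw [pvScan, htake, pv_get?_of_mem pk rk hmem]

lemma pv_scan_skip (c : Char) (cs : List Char)
    (h : ∀ pr ∈ pvTable, ¬ pr.1 <+: c :: cs) :
    pvScan (c :: cs) = c :: pvScan cs := by
  have hnone : PySem.Dict.get? (⟨pvTable⟩ : PySem.Dict (List Char) (List Char)) ((c :: cs).take 4) = none := by
    rw [Option.eq_none_iff_forall_ne_some]
    intro v hv
    unfold PySem.Dict.get? at hv
    obtain ⟨p, hfind, hp2⟩ := Option.map_eq_some_iff.mp hv
    have hpmem : p ∈ pvTable := List.mem_of_find?_eq_some hfind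
    have hpeq : p.1 = (c :: cs).take 4 := by
      have := List.find?_some hfind
      simpa using this
    have hplen : p.1.length = 4 := pv_key_len _ hpmem
    have hpref : p.1 <+: c :: cs := by
      rw [List.prefix_iff_eq_take, hplen, hpeq]
    exact h p hpmem hpref
  rw [pvScan, hnone]

lemma pv_scan_prepend (a r : List Char)
    (h : ∀ j < a.length, ∀ pr ∈ pvTable, ¬ pr.1 <+: (a ++ r).drop j) :
    pvScan (a ++ r) = a ++ pvScan r := by
  induction a with
  | nil => simp
  | cons c a' ih =>
    have h0 := h 0 (by simp)
    simp only [List.drop_zero] at h0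
    rw [show (c :: a') ++ r = c :: (a' ++ r) from rfl] at h0 ⊢
    rw [pv_scan_skip c (a' ++ r) h0]
    rw [ih (fun j hj pr hpr => by
      have := h (j + 1) (by simp; omega) pr hpr
      simpa using this)]
    rfl

lemma pv_scan_fix (l : List Char)
    (h : ∀ j, ∀ pr ∈ pvTable, ¬ pr.1 <+: l.drop j) :
    pvScan l = l := by
  induction l with
  | nil => rw [pvScan]
  | cons c cs ih =>
    rw [pv_scan_skip c cs (fun pr hpr => by simpa using h 0 pr hpr)]
    rw [ih (fun j pr hpr => by simpa using h (j + 1) pr hpr)]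


-- ---- main equivalence on char lists ----

lemma pv_chain_eq_scan : ∀ l : List Char, pvChain l = pvScan l := by
  have main : ∀ n, ∀ l : List Char, l.length ≤ n → pvChain l = pvScan l := by
    intro n
    induction n with
    | zero =>
      intro l hl
      have hnil : l = [] := List.length_eq_zero_iff.mp (Nat.le_zero.mp hl)
      subst hnil
      rw [show pvChain [] = [] from by decide, pvScan]
    | succ n ih =>
      intro l hl
      by_cases hex : ∃ j, ∃ pr ∈ pvTable, pr.1 <+: l.drop j
      · obtain ⟨pr, hpr, hmatch⟩ : ∃ pr ∈ pvTable, pr.1 <+: l.drop (Nat.find hex) :=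
          Nat.find_spec hex
        set i := Nat.find hex with hi
        have hmin : ∀ j < i, ∀ q ∈ pvTable, ¬ q.1 <+: l.drop j := by
          intro j hj q hq hcontra
          exact Nat.find_min hex hj ⟨q, hq, hcontra⟩
        have hklen : pr.1.length = 4 := pv_key_len pr hpr
        have hi4 : i + 4 ≤ l.length := by
          have h1 := hmatch.length_le
          rw [hklen, List.length_drop] at h1
          by_cases hil : i ≤ l.length
          · omega
          · exfalso
            have : l.drop i = [] := List.drop_of_length_le (by omega)
            rw [this] at hmatch
            have := hmatch.length_le
            rw [hklen] at this
            simp at this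
        set a := l.take i with ha
        set t := l.drop (i + 4) with ht
        have halen : a.length = i := List.length_take_of_le (by omega)
        have hdec : l = a ++ (pr.1 ++ t) := by
          have h2 : pr.1 = (l.drop i).take 4 := by
            have h2' := List.prefix_iff_eq_take.mp hmatch
            rwa [hklen] at h2'
          have h1 : l.drop i = pr.1 ++ t := by
            rw [ht, h2, ← List.drop_drop]
            exact (List.take_append_drop 4 (l.drop i)).symm
          rw [ha, ← h1, List.take_append_drop]
        have hminq : ∀ q ∈ pvTable, ∀ j < a.length, ¬ q.1 <+: (a ++ (pr.1 ++ t)).drop j := by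
          intro q hq j hj
          rw [← hdec]
          exact hmin j (halen ▸ hj) q hq
        obtain ⟨pre, post, hsplit⟩ := List.append_of_mem hpr
        have hkeys : ∀ q, (q ∈ pre ∨ q ∈ post) → q.1 ≠ pr.1 := by
          have hnd := pv_keys_nodup
          rw [hsplit, List.map_append, List.map_cons] at hnd
          obtain ⟨hnd1, hnd2, hdisj⟩ := List.nodup_append.mp hnd
          intro q hq heq
          rcases hq with hq | hq
          · exact hdisj q.1 (List.mem_map_of_mem hq) pr.1 List.mem_cons_self heq
          · exact (List.nodup_cons.mp hnd2).1 (by rw [← heq]; exact List.mem_map_of_mem hq)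
        have hmemApp : ∀ q, (q ∈ pre ∨ q ∈ post) → q ∈ pvTable := by
          intro q hq
          rw [hsplit]
          rcases hq with hq | hq
          · exact List.mem_append_left _ hq
          · exact List.mem_append_right _ (List.mem_cons_of_mem _ hq)
        have hFrontPre : ∀ q ∈ pre, q.1 ≠ [] ∧
            ∀ u j, j < (a ++ pr.1).length → ¬ q.1 <+: ((a ++ pr.1) ++ u).drop j := by
          intro q hq
          have hqmem : q ∈ pvTable := hmemApp q (Or.inl hq)
          have hq4 : q.1.length = 4 := pv_key_len q hqmem
          refine ⟨pv_key_ne_nil q hqmem, ?_⟩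
          intro u j hj
          refine pv_front_all a (pr.1 ++ t) pr.1 q.1 hq4 (by omega)
            (hminq q hqmem) (fun m h1 h2 => pv_mid_key pr hpr q hqmem m h1 h2)
            (fun d hd => pv_key_tail pr hpr q hqmem (hkeys q (Or.inl hq)) d (hklen ▸ hd))
            u j (by simpa using hj)
        have hFrontPost : ∀ q ∈ post, q.1 ≠ [] ∧
            ∀ u j, j < (a ++ pr.2).length → ¬ q.1 <+: ((a ++ pr.2) ++ u).drop j := by
          intro q hq
          have hqmem : q ∈ pvTable := hmemApp q (Or.inr hq)
          have hq4 : q.1.length = 4 := pv_key_len q hqmem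
          refine ⟨pv_key_ne_nil q hqmem, ?_⟩
          intro u j hj
          refine pv_front_all a (pr.1 ++ t) pr.2 q.1 hq4 (pv_full_len pr hpr)
            (hminq q hqmem) (fun m h1 h2 => pv_mid_full pr hpr q hqmem m h1 h2)
            (fun d hd => pv_full_tail pr hpr q hqmem (hkeys q (Or.inr hq)) d hd)
            u j (by simpa using hj)
        have hmid : pvRep ((a ++ pr.1) ++ (pre.foldl pvRep t)) pr
            = (a ++ pr.2) ++ pvRep (pre.foldl pvRep t) pr := by
          show PySem.Chars.replace _ pr.1 pr.2 = _
          rw [List.append_assoc]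
          rw [pv_rep_skip_all pr.1 pr.2 (pv_key_ne_nil pr hpr) a (pr.1 ++ pre.foldl pvRep t)
            (fun j hj => pv_front a (pr.1 ++ t) pr.1 pr.1 hklen (by omega)
              (hminq pr hpr) (fun m h1 h2 => pv_mid_key pr hpr pr hpr m h1 h2)
              (pre.foldl pvRep t) j hj)]
          rw [pv_rep_head pr.1 pr.2 _ (pv_key_ne_nil pr hpr)]
          rw [List.append_assoc]
          rfl
        have hchain : pvChain l
            = a ++ (pr.2 ++ post.foldl pvRep (pvRep (pre.foldl pvRep t) pr)) := by
          show pvTable.foldl pvRep l = _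
          rw [hsplit, hdec, ← List.append_assoc, List.foldl_append]
          rw [pv_foldl_front pre (a ++ pr.1) hFrontPre t]
          rw [List.foldl_cons, hmid]
          rw [pv_foldl_front post (a ++ pr.2) hFrontPost (pvRep (pre.foldl pvRep t) pr)]
          rw [List.append_assoc]
        have hchaint : pvChain t = post.foldl pvRep (pvRep (pre.foldl pvRep t) pr) := by
          show pvTable.foldl pvRep t = _
          rw [hsplit, List.foldl_append, List.foldl_cons]
        have hscan : pvScan l = a ++ (pr.2 ++ pvScan t) := by
          conv_lhs => rw [hdec]
          rw [pv_scan_prepend a (pr.1 ++ t) (fun j hj q hq => hminq q hq j hj)]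
          rw [pv_scan_match pr.1 pr.2 (pr.1 ++ t) (by simpa using hpr) (List.prefix_append _ _)]
          rw [show (pr.1 ++ t).drop 4 = t from by rw [← hklen, List.drop_left]]
        have htlen : t.length ≤ n := by
          rw [ht, List.length_drop]
          omega
        rw [hchain, ← hchaint, ih t htlen, hscan]
      · push_neg at hex
        have hchain : pvChain l = l := by
          refine pv_foldl_id pvTable l (fun pr hpr => ⟨pv_key_ne_nil pr hpr, ?_⟩)
          intro hinf
          obtain ⟨s, u, hsu⟩ := hinf
          refine hex s.length pr hpr ?_
          rw [← hsu, List.append_assoc, List.drop_left]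
          exact List.prefix_append _ _
        rw [hchain, pv_scan_fix l hex]
  intro l
  exact main l.length l le_rfl

-- ---- bridge to strings ----

lemma pv_fold_strings : ∀ (ms : List (String × String)) (t : String),
    (ms.foldl (fun t m => if PySem.Str.isIn m.1 t then PySem.Str.replace t m.1 m.2 else t) t).toList
      = (ms.map (fun m => (m.1.toList, m.2.toList))).foldl
          (fun t pr => if PySem.Chars.isIn pr.1 t then PySem.Chars.replace t pr.1 pr.2 else t) t.toList := by
  intro ms
  induction ms with
  | nil => intro t; simp
  | cons m ms' ih =>
    intro t
    simp only [List.foldl_cons, List.map_cons]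
    rw [ih]
    congr 1
    by_cases hin : PySem.Chars.isIn m.1.toList t.toList
    · simp [PySem.Str.isIn, hin, PySem.Str.toList_replace]
    · simp [PySem.Str.isIn, hin]

lemma pv_A_toList (text : String) :
    (normalize_cell_value text).toList = pvChain text.toList := by
  unfold normalize_cell_value pvChain
  rw [pv_fold_strings]
  rw [show pvMonths.map (fun m => (m.1.toList, m.2.toList)) = pvTable from rfl]
  have : ∀ (Q : List (List Char × List Char)), (∀ pr ∈ Q, pr.1 ≠ []) → ∀ (l : List Char),
      Q.foldl (fun t pr => if PySem.Chars.isIn pr.1 t then PySem.Chars.replace t pr.1 pr.2 else t) l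
        = Q.foldl pvRep l := by
    intro Q
    induction Q with
    | nil => intro _ l; rfl
    | cons pr Q' ih =>
      intro hne l
      simp only [List.foldl_cons]
      have hstep : (if PySem.Chars.isIn pr.1 l then PySem.Chars.replace l pr.1 pr.2 else l) = pvRep l pr := by
        by_cases hin : PySem.Chars.isIn pr.1 l
        · simp [hin, pvRep]
        · have : ¬ pr.1 <:+: l := (PySem.Chars.isIn_eq_false_iff _ _).mp (by simpa using hin)
          rw [if_neg (by simpa using hin), pvRep,
            pv_rep_no_infix pr.1 pr.2 (hne pr List.mem_cons_self) l this]
      rw [hstep]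
      exact ih (fun p hp => hne p (List.mem_cons_of_mem _ hp)) (pvRep l pr)
  exact this pvTable (fun pr hpr => by
    have := pv_key_len pr hpr
    intro hnil; rw [hnil] at this; simp at this) text.toList

-- ===== VERDICT (by name: the statement is the Claim_ definition above) =====
theorem normalize_cell_value_spec : Claim_equal_normalize_cell_value := by
  intro text _
  unfold Spec_normalize_cell_value
  rw [← String.toList_inj, pv_A_toList, pv_chain_eq_scan]
  simp [normalize_cell_value_alt]
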